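-- pv_equiv track=rewrite | github.com/PrithviSeran/Prince-Financials-Trading-Bot | CURRENTLY_TESTING/technicals.py | identify_trends_for_backtesting
-- ===== SOURCE A (Python) =====
-- def identify_trends_for_backtesting(all_highs, high_indexes, all_lows, low_indexes):
--
--     trend = []
--
--     #down trend
--     for i in range(1, len(all_highs) - 1, 1):
--         if all_highs[i - 1] < all_highs[i] < all_highs[i + 1]: #and trend:
--             #fig.add_vline(x = high_indexes[i], line_width=3, line_dash="dash", line_color="green")
--             trend.append((False, high_indexes[i]))
--
--     #down trend
--     for i in range(1, len(all_lows) - 1, 1):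
--         if all_lows[i - 1] > all_lows[i] > all_lows[i + 1]: #and not trend:
--             #fig.add_vline(x = low_indexes[i], line_width=3, line_dash="dash", line_color="red")
--             trend.append((True, low_indexes[i]))
--
--     trend = sorted(trend, key=lambda x: x[1])
--
--     i = 0
--     while i < len(trend) - 1:
--         if trend[i + 1][0] == trend[i][0]:
--             trend.pop(i + 1)
--         else:
--             i = i + 1
--
--     return trend
-- ===== SOURCE B (Python) =====
-- def identify_trends_for_backtesting(all_highs, high_indexes, all_lows, low_indexes):
--     # Single-pass candidate collection via zip and a linear run-compaction
--     # (keep the first element of each same-flag run) instead of repeated list.pop.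
--     cands = []
--     for a, b, c, idx in zip(all_highs, all_highs[1:], all_highs[2:], high_indexes[1:]):
--         if a < b < c:
--             cands.append((False, idx))
--     for a, b, c, idx in zip(all_lows, all_lows[1:], all_lows[2:], low_indexes[1:]):
--         if a > b > c:
--             cands.append((True, idx))
--     cands.sort(key=lambda x: x[1])
--     out = []
--     for item in cands:
--         if not out or out[-1][0] != item[0]:
--             out.append(item)
--     return out
-- ===== Notes on version B (the rewrite author's own statement) =====
-- stated objective: faster
-- what changed: B collects the pivot candidates in one zip pass over adjacent triples and compacts runs of equal flags with a single linear fold, instead of A's index loops with repeated element indexing and a while-loop that repeatedly calls list.pop(i+1).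
import Mathlib
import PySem

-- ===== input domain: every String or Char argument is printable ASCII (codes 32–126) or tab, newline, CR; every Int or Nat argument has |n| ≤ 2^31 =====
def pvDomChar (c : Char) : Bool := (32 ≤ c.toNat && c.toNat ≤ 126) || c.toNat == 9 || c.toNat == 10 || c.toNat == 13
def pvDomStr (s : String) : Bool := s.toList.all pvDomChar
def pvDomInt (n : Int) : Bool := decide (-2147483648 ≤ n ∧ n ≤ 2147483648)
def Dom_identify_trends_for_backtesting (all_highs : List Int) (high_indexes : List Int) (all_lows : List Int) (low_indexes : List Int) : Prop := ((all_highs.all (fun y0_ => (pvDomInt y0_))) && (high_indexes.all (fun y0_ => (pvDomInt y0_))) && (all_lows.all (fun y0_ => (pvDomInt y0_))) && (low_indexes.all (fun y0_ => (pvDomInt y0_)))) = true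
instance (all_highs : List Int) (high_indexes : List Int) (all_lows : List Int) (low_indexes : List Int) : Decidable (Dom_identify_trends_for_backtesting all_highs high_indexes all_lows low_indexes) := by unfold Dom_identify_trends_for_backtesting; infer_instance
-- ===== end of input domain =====

-- B collects the pivot candidates in one zip pass and compacts runs of equal flags with a
-- single linear fold instead of A's index loop with repeated list.pop(i+1) (objective: faster).

-- ===== PORT A =====
-- A's final while-loop: i = 0; while i < len(trend) - 1: pop trend[i+1] if its flag equals
-- trend[i]'s, else i += 1.  List.eraseIdx is exactly list.pop(i+1) (return value discarded);
-- getD is exact because the guard keeps both indices in range.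
def pySqueeze (trend : List (Bool × Int)) (i : Nat) : List (Bool × Int) :=
  if h : i + 1 < trend.length then
    if (trend.getD (i + 1) (false, 0)).1 = (trend.getD i (false, 0)).1 then
      pySqueeze (trend.eraseIdx (i + 1)) i
    else
      pySqueeze trend (i + 1)
  else trend
termination_by trend.length - i
decreasing_by
  · have := @List.length_eraseIdx _ trend (i + 1); simp [h] at this; omega
  · omega

-- pyGetD is exact here: the all_highs/all_lows indices i-1, i, i+1 are always in range for
-- i ∈ range(1, len-1); high_indexes[i]/low_indexes[i] is in range exactly under Pre_ (outside
-- it Python raises IndexError).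
def identify_trends_for_backtesting (all_highs : List Int) (high_indexes : List Int) (all_lows : List Int) (low_indexes : List Int) : List (Bool × Int) :=
  let trend : List (Bool × Int) := []
  let trend := (PySem.List.pyRange 1 (PySem.List.len all_highs - 1) 1).foldl
    (fun trend i =>
      if PySem.List.pyGetD all_highs (i - 1) 0 < PySem.List.pyGetD all_highs i 0 ∧
         PySem.List.pyGetD all_highs i 0 < PySem.List.pyGetD all_highs (i + 1) 0 then
        trend ++ [(false, PySem.List.pyGetD high_indexes i 0)]
      else trend) trend
  let trend := (PySem.List.pyRange 1 (PySem.List.len all_lows - 1) 1).foldl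
    (fun trend i =>
      if PySem.List.pyGetD all_lows (i - 1) 0 > PySem.List.pyGetD all_lows i 0 ∧
         PySem.List.pyGetD all_lows i 0 > PySem.List.pyGetD all_lows (i + 1) 0 then
        trend ++ [(true, PySem.List.pyGetD low_indexes i 0)]
      else trend) trend
  let trend := PySem.List.sorted trend (fun x => x.2) false
  pySqueeze trend 0

-- ===== PORT B =====
-- 'if not out or out[-1][0] != item[0]: out.append(item)'
def altCompactStep (out : List (Bool × Int)) (item : Bool × Int) : List (Bool × Int) :=
  match out.getLast? with
  | none => out ++ [item]
  | some l => if l.1 ≠ item.1 then out ++ [item] else out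

def identify_trends_for_backtesting_alt (all_highs : List Int) (high_indexes : List Int) (all_lows : List Int) (low_indexes : List Int) : List (Bool × Int) :=
  let cands : List (Bool × Int) := []
  let cands := (all_highs.zip ((PySem.List.slice all_highs (some 1) none).zip
      ((PySem.List.slice all_highs (some 2) none).zip (PySem.List.slice high_indexes (some 1) none)))).foldl
    (fun cands x =>
      if x.1 < x.2.1 ∧ x.2.1 < x.2.2.1 then cands ++ [(false, x.2.2.2)] else cands) cands
  let cands := (all_lows.zip ((PySem.List.slice all_lows (some 1) none).zip
      ((PySem.List.slice all_lows (some 2) none).zip (PySem.List.slice low_indexes (some 1) none)))).foldl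
    (fun cands x =>
      if x.1 > x.2.1 ∧ x.2.1 > x.2.2.1 then cands ++ [(true, x.2.2.2)] else cands) cands
  let cands := PySem.List.sorted cands (fun x => x.2) false
  cands.foldl altCompactStep []

-- ===== PRECONDITION & SPEC =====
-- Pre_ excludes exactly the inputs on which A raises IndexError: a strictly-monotone triple
-- detected around position i+1 of all_highs (resp. all_lows) whose index list has no entry i+1.
def Pre_identify_trends_for_backtesting (all_highs : List Int) (high_indexes : List Int) (all_lows : List Int) (low_indexes : List Int) : Prop :=
  (∀ i : Nat, i < all_highs.length → i + 2 < all_highs.length →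
    (all_highs.getD i 0 < all_highs.getD (i + 1) 0 ∧ all_highs.getD (i + 1) 0 < all_highs.getD (i + 2) 0) →
    i + 1 < high_indexes.length) ∧
  (∀ i : Nat, i < all_lows.length → i + 2 < all_lows.length →
    (all_lows.getD i 0 > all_lows.getD (i + 1) 0 ∧ all_lows.getD (i + 1) 0 > all_lows.getD (i + 2) 0) →
    i + 1 < low_indexes.length)
instance (all_highs : List Int) (high_indexes : List Int) (all_lows : List Int) (low_indexes : List Int) : Decidable (Pre_identify_trends_for_backtesting all_highs high_indexes all_lows low_indexes) := by unfold Pre_identify_trends_for_backtesting; infer_instance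

def pvWitness_identify_trends_for_backtesting : List Int × List Int × List Int × List Int :=
  ([1, 2, 3], [0, 1, 2], [3, 1, 0], [0, 1, 2])

def Spec_identify_trends_for_backtesting (all_highs : List Int) (high_indexes : List Int) (all_lows : List Int) (low_indexes : List Int) (out : List (Bool × Int)) : Prop := out = identify_trends_for_backtesting_alt all_highs high_indexes all_lows low_indexes
instance (all_highs : List Int) (high_indexes : List Int) (all_lows : List Int) (low_indexes : List Int) (out : List (Bool × Int)) : Decidable (Spec_identify_trends_for_backtesting all_highs high_indexes all_lows low_indexes out) := by unfold Spec_identify_trends_for_backtesting; infer_instance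

-- ===== CLAIM (what is proved, stated in full; the proofs are below) =====
def Claim_equal_identify_trends_for_backtesting : Prop := ∀ (all_highs : List Int) (high_indexes : List Int) (all_lows : List Int) (low_indexes : List Int), Dom_identify_trends_for_backtesting all_highs high_indexes all_lows low_indexes → Pre_identify_trends_for_backtesting all_highs high_indexes all_lows low_indexes → Spec_identify_trends_for_backtesting all_highs high_indexes all_lows low_indexes (identify_trends_for_backtesting all_highs high_indexes all_lows low_indexes)

-- ===== LEMMAS AND PROOFS =====

-- common specification of one candidate pass: one entry per strict P-monotone triple
def candsSpec (flag : Bool) (P : Int → Int → Prop) [DecidableRel P] : List Int → List Int → List (Bool × Int)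
  | a :: b :: c :: t, _ :: y :: ys =>
      (if P a b ∧ P b c then [(flag, y)] else []) ++ candsSpec flag P (b :: c :: t) (y :: ys)
  | _, _ => []

-- flag-run compaction keeping the first element of each run
def dedupFlag : Bool → List (Bool × Int) → List (Bool × Int)
  | _, [] => []
  | b, x :: xs => if x.1 = b then dedupFlag b xs else x :: dedupFlag x.1 xs

theorem rangeCands (flag : Bool) (P : Int → Int → Prop) [DecidableRel P] :
    ∀ (ah hi : List Int),
      (∀ i : Nat, i + 2 < ah.length →
        (P (ah.getD i 0) (ah.getD (i + 1) 0) ∧ P (ah.getD (i + 1) 0) (ah.getD (i + 2) 0)) →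
        i + 1 < hi.length) →
      ((List.range (ah.length - 2)).filter
          (fun k => decide (P (ah.getD k 0) (ah.getD (k + 1) 0) ∧ P (ah.getD (k + 1) 0) (ah.getD (k + 2) 0)))).map
        (fun k => ((flag, hi.getD (k + 1) 0) : Bool × Int)) = candsSpec flag P ah hi := by
  intro ah
  induction ah with
  | nil => intro hi H; simp [candsSpec]
  | cons a t ih =>
      intro hi H
      match t with
      | [] => simp [candsSpec]
      | [b] => simp [candsSpec]
      | b :: c :: t2 =>
          have hlen : (a :: b :: c :: t2).length - 2 = t2.length + 1 := by simp
          rw [hlen, List.range_succ_eq_map, List.filter_cons]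
          have htail :
              ((List.map Nat.succ (List.range t2.length)).filter
                  (fun k => decide (P ((a :: b :: c :: t2).getD k 0) ((a :: b :: c :: t2).getD (k + 1) 0) ∧
                    P ((a :: b :: c :: t2).getD (k + 1) 0) ((a :: b :: c :: t2).getD (k + 2) 0)))).map
                (fun k => ((flag, hi.getD (k + 1) 0) : Bool × Int))
              = ((List.range t2.length).filter
                  (fun k => decide (P ((b :: c :: t2).getD k 0) ((b :: c :: t2).getD (k + 1) 0) ∧
                    P ((b :: c :: t2).getD (k + 1) 0) ((b :: c :: t2).getD (k + 2) 0)))).map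
                (fun k => ((flag, hi.getD (k + 2) 0) : Bool × Int)) := by
            rw [List.filter_map, List.map_map]
            congr 1
          have hH' : ∀ (x y : Int) (ys : List Int), hi = x :: y :: ys →
              (∀ i : Nat, i + 2 < (b :: c :: t2).length →
                (P ((b :: c :: t2).getD i 0) ((b :: c :: t2).getD (i + 1) 0) ∧
                 P ((b :: c :: t2).getD (i + 1) 0) ((b :: c :: t2).getD (i + 2) 0)) →
                i + 1 < (y :: ys).length) := by
            intro x y ys hhi i hi2 hc
            have := H (i + 1) (by simp at hi2 ⊢; omega) (by simpa using hc)
            rw [hhi] at this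
            simp at this ⊢
            omega
          by_cases hcond : P a b ∧ P b c
          · have hfire : 0 + 1 < hi.length := H 0 (by simp) (by simpa using hcond)
            match hi, hfire with
            | x :: y :: ys, _ =>
              have hP' := hH' x y ys rfl
              rw [if_pos (by simpa using hcond)]
              rw [List.map_cons, htail]
              have hihl := ih (y :: ys) hP'
              have hr2 : (b :: c :: t2).length - 2 = t2.length := by simp
              rw [hr2] at hihl
              simp only [List.getD_cons_succ, List.getD_cons_zero] at hihl ⊢
              rw [hihl]
              simp [candsSpec, hcond]
          · rw [if_neg (by simpa using hcond)]
            rw [htail]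
            match hi with
            | x :: y :: ys =>
              have hP' := hH' x y ys rfl
              have hihl := ih (y :: ys) hP'
              have hr2 : (b :: c :: t2).length - 2 = t2.length := by simp
              rw [hr2] at hihl
              simp only [List.getD_cons_succ] at hihl ⊢
              rw [hihl]
              simp [candsSpec, hcond]
            | [] =>
              simp only [candsSpec]
              rw [List.map_eq_nil_iff, List.filter_eq_nil_iff]
              intro k hk
              simp only [List.mem_range] at hk
              simp only [decide_eq_true_eq]
              intro hc
              have := H (k + 1) (by simp; omega) (by simpa using hc)
              simp at this
            | [x] =>
              simp only [candsSpec]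
              rw [List.map_eq_nil_iff, List.filter_eq_nil_iff]
              intro k hk
              simp only [List.mem_range] at hk
              simp only [decide_eq_true_eq]
              intro hc
              have := H (k + 1) (by simp; omega) (by simpa using hc)
              simp at this

theorem loopA_eq (flag : Bool) (P : Int → Int → Prop) [DecidableRel P] (ah hi : List Int)
    (H : ∀ i : Nat, i + 2 < ah.length →
      (P (ah.getD i 0) (ah.getD (i + 1) 0) ∧ P (ah.getD (i + 1) 0) (ah.getD (i + 2) 0)) →
      i + 1 < hi.length) (acc : List (Bool × Int)) :
    (PySem.List.pyRange 1 (PySem.List.len ah - 1) 1).foldl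
      (fun tr i =>
        if P (PySem.List.pyGetD ah (i - 1) 0) (PySem.List.pyGetD ah i 0) ∧
           P (PySem.List.pyGetD ah i 0) (PySem.List.pyGetD ah (i + 1) 0) then
          tr ++ [(flag, PySem.List.pyGetD hi i 0)]
        else tr) acc
      = acc ++ candsSpec flag P ah hi := by
  rw [PySem.List.foldl_append_ite
    (p := fun i => P (PySem.List.pyGetD ah (i - 1) 0) (PySem.List.pyGetD ah i 0) ∧
           P (PySem.List.pyGetD ah i 0) (PySem.List.pyGetD ah (i + 1) 0))
    (f := fun i => ((flag, PySem.List.pyGetD hi i 0) : Bool × Int))]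
  rw [← rangeCands flag P ah hi H]
  congr 1
  have hlen : PySem.List.len ah = (ah.length : Int) := by simp [PySem.List.len_eq]
  rw [hlen, PySem.List.pyRange_one]
  have ht : ((ah.length : Int) - 1 - 1).toNat = ah.length - 2 := by omega
  rw [ht, List.filter_map, List.map_map]
  have hfil : (fun k : Nat => (fun i : Int => decide (P (PySem.List.pyGetD ah (i - 1) 0) (PySem.List.pyGetD ah i 0) ∧
           P (PySem.List.pyGetD ah i 0) (PySem.List.pyGetD ah (i + 1) 0))) ((fun k : Nat => (1 : Int) + k) k))
      = (fun k : Nat => decide (P (ah.getD k 0) (ah.getD (k + 1) 0) ∧ P (ah.getD (k + 1) 0) (ah.getD (k + 2) 0))) := by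
    funext k
    have e2 : (1 : Int) + k = (((k + 1 : Nat)) : Int) := by push_cast; ring
    have e1' : (((k + 1 : Nat)) : Int) - 1 = ((k : Nat) : Int) := by push_cast; ring
    have e3' : (((k + 1 : Nat)) : Int) + 1 = (((k + 2 : Nat)) : Int) := by push_cast; ring
    simp only [e2, e1', e3', PySem.List.pyGetD_natCast]
  have hmap : (fun k : Nat => (fun i : Int => ((flag, PySem.List.pyGetD hi i 0) : Bool × Int)) ((fun k : Nat => (1 : Int) + k) k))
      = (fun k : Nat => ((flag, hi.getD (k + 1) 0) : Bool × Int)) := by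
    funext k
    have e2 : (1 : Int) + k = (((k + 1 : Nat)) : Int) := by push_cast; ring
    simp only [e2, PySem.List.pyGetD_natCast]
  rw [show ((fun i : Int => decide (P (PySem.List.pyGetD ah (i - 1) 0) (PySem.List.pyGetD ah i 0) ∧
           P (PySem.List.pyGetD ah i 0) (PySem.List.pyGetD ah (i + 1) 0))) ∘ (fun k : Nat => (1 : Int) + k)) = _ from hfil,
     show ((fun i : Int => ((flag, PySem.List.pyGetD hi i 0) : Bool × Int)) ∘ (fun k : Nat => (1 : Int) + k)) = _ from hmap]

theorem zipFold_eq (flag : Bool) (P : Int → Int → Prop) [DecidableRel P] :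
    ∀ (ah hi : List Int) (acc : List (Bool × Int)),
      (ah.zip ((ah.drop 1).zip ((ah.drop 2).zip (hi.drop 1)))).foldl
        (fun cands x => if P x.1 x.2.1 ∧ P x.2.1 x.2.2.1 then cands ++ [(flag, x.2.2.2)] else cands) acc
      = acc ++ candsSpec flag P ah hi := by
  intro ah
  induction ah with
  | nil => intro hi acc; simp [candsSpec]
  | cons a t ih =>
      intro hi acc
      match t, hi with
      | [], _ => simp [candsSpec]
      | [b], _ => simp [candsSpec]
      | b :: c :: t2, [] => simp [candsSpec]
      | b :: c :: t2, [x] => simp [candsSpec]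
      | b :: c :: t2, x :: y :: ys =>
          simp only [List.drop_succ_cons, List.drop_zero, List.zip_cons_cons, List.foldl_cons]
          have hrec := ih (y :: ys) (if P a b ∧ P b c then acc ++ [(flag, y)] else acc)
          simp only [List.drop_succ_cons, List.drop_zero] at hrec
          rw [hrec]
          by_cases h : P a b ∧ P b c
          · rw [if_pos h]; simp [candsSpec, h]
          · rw [if_neg h]; simp [candsSpec, h]

theorem compactB_go : ∀ (rest pre : List (Bool × Int)) (cur : Bool × Int),
    rest.foldl altCompactStep (pre ++ [cur]) = pre ++ cur :: dedupFlag cur.1 rest := by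
  intro rest
  induction rest with
  | nil => intro pre cur; simp [dedupFlag]
  | cons x r ih =>
      intro pre cur
      rw [List.foldl_cons]
      have hstep : altCompactStep (pre ++ [cur]) x =
          if cur.1 ≠ x.1 then (pre ++ [cur]) ++ [x] else pre ++ [cur] := by
        simp [altCompactStep]
      by_cases hx : x.1 = cur.1
      · rw [hstep, if_neg (by simp [hx])]
        rw [ih pre cur]
        simp [dedupFlag, hx]
      · rw [hstep, if_pos (by simp; exact fun h => hx h.symm)]
        rw [List.append_assoc, List.singleton_append]
        have h2 := ih (pre ++ [cur]) x
        rw [List.append_assoc, List.singleton_append] at h2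
        rw [h2]
        simp [dedupFlag, hx]

theorem squeezeA : ∀ (rest pre : List (Bool × Int)) (cur : Bool × Int),
    pySqueeze (pre ++ cur :: rest) pre.length = pre ++ cur :: dedupFlag cur.1 rest := by
  intro rest
  induction rest with
  | nil =>
      intro pre cur
      rw [pySqueeze]
      simp [dedupFlag]
  | cons x r ih =>
      intro pre cur
      rw [pySqueeze]
      have hlen : pre.length + 1 < (pre ++ cur :: x :: r).length := by simp
      rw [dif_pos hlen]
      have hg1 : (pre ++ cur :: x :: r).getD pre.length (false, 0) = cur := by
        rw [List.getD_append_right _ _ _ _ (le_refl _)]; simp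
      have hg2 : (pre ++ cur :: x :: r).getD (pre.length + 1) (false, 0) = x := by
        rw [List.getD_append_right _ _ _ _ (by omega)]; simp
      rw [hg1, hg2]
      by_cases hx : x.1 = cur.1
      · rw [if_pos hx]
        have he : (pre ++ cur :: x :: r).eraseIdx (pre.length + 1) = pre ++ cur :: r := by
          rw [List.eraseIdx_append_of_length_le (by omega)]; simp
        rw [he, ih pre cur]
        simp [dedupFlag, hx]
      · rw [if_neg hx]
        have hl : pre.length + 1 = (pre ++ [cur]).length := by simp
        rw [hl]
        have h2 := ih (pre ++ [cur]) x
        rw [List.append_assoc] at h2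
        simp only [List.singleton_append] at h2
        rw [h2]
        simp [dedupFlag, hx]

theorem squeeze_eq_compact (l : List (Bool × Int)) :
    pySqueeze l 0 = l.foldl altCompactStep [] := by
  cases l with
  | nil => rw [pySqueeze]; simp
  | cons c r =>
      have h1 := squeezeA r [] c
      have h2 := compactB_go r [] c
      simp at h1 h2
      simpa [altCompactStep] using h1.trans h2.symm

-- ===== VERDICT (by name: the statement is the Claim_ definition above) =====
theorem identify_trends_for_backtesting_spec : Claim_equal_identify_trends_for_backtesting := by
  intro ah hi al li _hDom hPre
  unfold Spec_identify_trends_for_backtesting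
  unfold identify_trends_for_backtesting identify_trends_for_backtesting_alt
  simp only []
  have hH : ∀ i : Nat, i + 2 < ah.length →
      (ah.getD i 0 < ah.getD (i + 1) 0 ∧ ah.getD (i + 1) 0 < ah.getD (i + 2) 0) →
      i + 1 < hi.length := fun i h2 hc => hPre.1 i (by omega) h2 hc
  have hL : ∀ i : Nat, i + 2 < al.length →
      (al.getD i 0 > al.getD (i + 1) 0 ∧ al.getD (i + 1) 0 > al.getD (i + 2) 0) →
      i + 1 < li.length := fun i h2 hc => hPre.2 i (by omega) h2 hc
  rw [loopA_eq false (· < ·) ah hi hH []]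
  rw [loopA_eq true (· > ·) al li hL _]
  have hs1 : ∀ xs : List Int, PySem.List.slice xs (some 1) none = xs.drop 1 := by
    intro xs; rw [PySem.List.slice_from_one, List.drop_one]
  have hs2 : ∀ xs : List Int, PySem.List.slice xs (some 2) none = xs.drop 2 := by
    intro xs; rw [PySem.List.slice_from xs (a := 2) (by norm_num)]; rfl
  rw [hs1 ah, hs1 hi, hs1 al, hs1 li, hs2 ah, hs2 al]
  rw [zipFold_eq false (· < ·) ah hi []]
  rw [zipFold_eq true (· > ·) al li _]
  rw [squeeze_eq_compact]
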